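-- pv_equiv track=rewrite | github.com/Sh-IT0311/Coding-Test | programmers/level3/인사고과.py | solution
-- ===== SOURCE A (Python) =====
-- def solution(scores):
--     temp = scores[0]
--     value = temp[0] + temp[1]
--     scores = list(filter(lambda x : x[0] + x[1] > value, scores))
--     if not scores:
--         return 1
--     _max = max(scores, key = lambda x : x[0])[0]
--     _max = max(_max, temp[0])
--
--     data = [-1] * (_max+2)
--     for a,b in scores:
--         data[a] = max(data[a], b)
--     for i in range(_max-1, -1, -1):
--         data[i] = max(data[i], data[i+1])
--
--     if data[temp[0]+1] > temp[1]:
--         return -1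
--
--     answer = 1
--     for score in scores:
--         if data[score[0]+1] > score[1]:
--             continue
--         answer += 1
--
--     return answer
-- ===== SOURCE B (Python) =====
-- def solution(scores):
--     x0, y0 = scores[0][0], scores[0][1]
--     total = x0 + y0
--     dominated0 = False
--     count = 1
--     best = None   # max second score among people with strictly greater first score
--     cur = None    # max second score among all people seen so far
--     prev = None   # first score of the previously processed person
--     for p in sorted(scores, key=lambda p: p[0], reverse=True):
--         a, b = p[0], p[1]
--         if prev is not None and a < prev:
--             best = cur
--         if a > x0 and b > y0:
--             dominated0 = True
--         if a + b > total and (best is None or b >= best):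
--             count += 1
--         cur = b if cur is None else max(cur, b)
--         prev = a
--     return -1 if dominated0 else count
-- ===== Notes on version B (the rewrite author's own statement) =====
-- stated objective: alternative
-- what changed: Replaced A's value-indexed bucket array plus suffix-max pass (allocating an array of size max_score+2) by a sort-by-first-score-descending and a single sweep that freezes the running best second score across equal-first-score groups; domination and the final count are decided during the sweep.
-- outside the precondition, e.g. on solution([[0, 0], [-1, 5]]): A returns -1, B returns 2
import Mathlib
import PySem

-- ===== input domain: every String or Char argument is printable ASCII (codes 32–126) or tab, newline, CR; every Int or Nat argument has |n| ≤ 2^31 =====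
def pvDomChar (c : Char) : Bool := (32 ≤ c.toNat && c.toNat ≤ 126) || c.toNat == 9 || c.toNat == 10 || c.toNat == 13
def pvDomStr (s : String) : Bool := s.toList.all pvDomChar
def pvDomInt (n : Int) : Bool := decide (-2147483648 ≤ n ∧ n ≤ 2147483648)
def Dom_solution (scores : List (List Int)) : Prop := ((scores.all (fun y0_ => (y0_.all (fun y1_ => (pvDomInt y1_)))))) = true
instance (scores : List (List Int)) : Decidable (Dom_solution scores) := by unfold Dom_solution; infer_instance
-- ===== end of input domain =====

-- B replaces A's value-indexed bucket array + suffix-max by a sort-descending-and-sweep (alternative algorithm); equivalence is proved on Pre_ below.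

-- row reads r[0], r[1]: exact under Pre_ (every row has length 2)
def pvF0 (r : List Int) : Int := PySem.List.pyGetD r 0 0
def pvF1 (r : List Int) : Int := PySem.List.pyGetD r 1 0

-- ===== PORT A =====
def solution (scores : List (List Int)) : Int :=
  let temp := PySem.List.pyGetD scores 0 []            -- temp = scores[0]
  let value := pvF0 temp + pvF1 temp                   -- value = temp[0] + temp[1]
  let scores1 := scores.filter (fun x => decide (value < pvF0 x + pvF1 x))  -- filter(lambda x: x[0]+x[1] > value, ...)
  if scores1 = [] then 1
  else
    let m0 := pvF0 (PySem.List.maxD scores1 (fun x => pvF0 x) [])  -- max(scores, key=lambda x: x[0])[0]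
    let M := max m0 (pvF0 temp)                        -- _max = max(_max, temp[0])
    let data0 : List Int := List.replicate (M + 2).toNat (-1)      -- data = [-1] * (_max+2)
    -- for a,b in scores: data[a] = max(data[a], b)   (in-range under Pre_)
    let data1 := scores1.foldl
      (fun d r => PySem.List.pySetD d (pvF0 r) (max (PySem.List.pyGetD d (pvF0 r) (-1)) (pvF1 r))) data0
    -- for i in range(_max-1, -1, -1): data[i] = max(data[i], data[i+1])
    let data2 := (PySem.List.pyRange (M - 1) (-1) (-1)).foldl
      (fun d i => PySem.List.pySetD d i (max (PySem.List.pyGetD d i (-1)) (PySem.List.pyGetD d (i + 1) (-1)))) data1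
    if PySem.List.pyGetD data2 (pvF0 temp + 1) (-1) > pvF1 temp then -1
    else
      -- answer = 1; for score in scores: if data[score[0]+1] > score[1]: continue; answer += 1
      scores1.foldl (fun ans r => if PySem.List.pyGetD data2 (pvF0 r + 1) (-1) > pvF1 r then ans else ans + 1) 1

-- ===== PORT B =====
-- state = (dominated0, count, best, cur, prev)
def pvStep (x0 y0 total : Int)
    (s : Bool × Int × Option Int × Option Int × Option Int) (p : List Int) :
    Bool × Int × Option Int × Option Int × Option Int :=
  let a := pvF0 p
  let b := pvF1 p
  let best := match s.2.2.2.2 with          -- if prev is not None and a < prev: best = cur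
    | some pv => if a < pv then s.2.2.2.1 else s.2.2.1
    | none => s.2.2.1
  let dom := s.1 || (decide (x0 < a) && decide (y0 < b))
  let cnt := if decide (total < a + b) && (match best with | none => true | some bb => decide (bb ≤ b)) then s.2.1 + 1 else s.2.1
  let cur := some (match s.2.2.2.1 with | none => b | some c => max c b)
  (dom, cnt, best, cur, some a)

def solution_alt (scores : List (List Int)) : Int :=
  let x0 := pvF0 (PySem.List.pyGetD scores 0 [])
  let y0 := pvF1 (PySem.List.pyGetD scores 0 [])
  let total := x0 + y0
  let st := (PySem.List.sorted scores (fun p => pvF0 p) true).foldl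
    (pvStep x0 y0 total) (false, 1, none, none, none)
  if st.1 then -1 else st.2.1

-- ===== PRECONDITION & SPEC =====
-- Pre_ excludes: the empty list and rows shorter than 2 (A raises IndexError there), rows that pass
-- the sum filter but are not exact pairs (A's unpacking raises ValueError), and negative scores in
-- the filtered rows or in person 0's row when the filter is nonempty, on which A either raises
-- IndexError or silently wraps negative bucket indices Python-style, an artefact of its
-- value-indexed array.
def Pre_solution (scores : List (List Int)) : Prop :=
  scores ≠ [] ∧ (∀ r ∈ scores, 2 ≤ r.length) ∧
  (∀ r ∈ scores,
      pvF0 (PySem.List.pyGetD scores 0 []) + pvF1 (PySem.List.pyGetD scores 0 []) < pvF0 r + pvF1 r →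
      r.length = 2 ∧ 0 ≤ pvF0 r ∧ 0 ≤ pvF1 r) ∧
  ((∃ r ∈ scores,
      pvF0 (PySem.List.pyGetD scores 0 []) + pvF1 (PySem.List.pyGetD scores 0 []) < pvF0 r + pvF1 r) →
      0 ≤ pvF0 (PySem.List.pyGetD scores 0 []) ∧ 0 ≤ pvF1 (PySem.List.pyGetD scores 0 []))
instance (scores : List (List Int)) : Decidable (Pre_solution scores) := by unfold Pre_solution; infer_instance
def pvWitness_solution : List (List Int) := [[2, 2], [3, 4], [1, 1], [3, 3]]
def Spec_solution (scores : List (List Int)) (out : Int) : Prop := out = solution_alt scores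
instance (scores : List (List Int)) (out : Int) : Decidable (Spec_solution scores out) := by unfold Spec_solution; infer_instance

-- ===== CLAIM (what is proved, stated in full; the proofs are below) =====
def Claim_equal_solution : Prop := ∀ (scores : List (List Int)), Dom_solution scores → Pre_solution scores → Spec_solution scores (solution scores)

-- ===== LEMMAS AND PROOFS =====

-- the common canonical value both programs compute
def pvBeat (l : List (List Int)) (x y : Int) : Bool := l.any (fun r => decide (x < pvF0 r) && decide (y < pvF1 r))

-- "max second score so far" as B's cur accumulator computes it
def pvMaxSnd (l : List (List Int)) : Option Int :=
  l.foldl (fun c r => some (match c with | none => pvF1 r | some v => max v (pvF1 r))) none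

def pvLastF (pre : List (List Int)) : Int := match pre.getLast? with | some r => pvF0 r | none => 0
def pvBestOf (pre : List (List Int)) : Option Int := pvMaxSnd (pre.filter (fun r => decide (pvLastF pre < pvF0 r)))

theorem pvMaxSnd_from_some (l : List (List Int)) : ∀ c : Int,
    l.foldl (fun c r => some (match c with | none => pvF1 r | some v => max v (pvF1 r))) (some c)
    = some (l.foldl (fun a r => max a (pvF1 r)) c) := by
  induction l with
  | nil => intro c; rfl
  | cons r t ih => intro c; simpa using ih (max c (pvF1 r))

theorem pvMaxSnd_cons (r : List Int) (t : List (List Int)) :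
    pvMaxSnd (r :: t) = some (t.foldl (fun a s => max a (pvF1 s)) (pvF1 r)) := by
  simpa [pvMaxSnd] using pvMaxSnd_from_some t (pvF1 r)

theorem foldl_max_le_iff (t : List (List Int)) : ∀ (c b : Int),
    (t.foldl (fun a s => max a (pvF1 s)) c ≤ b) ↔ (c ≤ b ∧ ∀ s ∈ t, pvF1 s ≤ b) := by
  induction t with
  | nil => simp
  | cons r t ih =>
    intro c b
    simp only [List.foldl_cons, ih, max_le_iff, List.mem_cons]
    constructor
    · rintro ⟨⟨h1, h2⟩, h3⟩; exact ⟨h1, fun s hs => hs.elim (fun e => e ▸ h2) (h3 s)⟩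
    · rintro ⟨h1, h2⟩; exact ⟨⟨h1, h2 r (Or.inl rfl)⟩, fun s hs => h2 s (Or.inr hs)⟩

theorem cond_eq (l : List (List Int)) (b : Int) :
    (match pvMaxSnd l with | none => true | some bb => decide (bb ≤ b))
    = ! l.any (fun r => decide (b < pvF1 r)) := by
  cases l with
  | nil => rfl
  | cons r t =>
    rw [pvMaxSnd_cons]
    rw [Bool.eq_iff_iff]
    simp only [decide_eq_true_eq, Bool.not_eq_true', List.any_eq_false, decide_eq_false_iff_not,
      not_lt, foldl_max_le_iff, List.mem_cons]
    constructor
    · rintro ⟨h1, h2⟩ s hs; rcases hs with rfl | hs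
      · exact h1
      · exact h2 s hs
    · intro h; exact ⟨h r (Or.inl rfl), fun s hs => h s (Or.inr hs)⟩

theorem pvLastF_le (pre : List (List Int)) (hp : pre.Pairwise (fun r s => pvF0 s ≤ pvF0 r)) :
    ∀ r ∈ pre, pvLastF pre ≤ pvF0 r := by
  cases h : pre.getLast? with
  | none => simp [List.getLast?_eq_none_iff.mp h]
  | some g =>
    intro r hr
    have hne : pre ≠ [] := by rintro rfl; simp at h
    have hg : pre.getLast hne = g := by
      have := List.getLast?_eq_getLast (l := pre) hne   -- getLast? = some (getLast)
      rw [h] at this; exact (Option.some.injEq _ _ ▸ this.symm)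
    have hsplit : pre.dropLast ++ [g] = pre := by
      rw [← hg]; exact List.dropLast_append_getLast hne
    have hLF : pvLastF pre = pvF0 g := by simp [pvLastF, h]
    rw [hLF]
    rw [← hsplit] at hr hp
    rcases List.mem_append.mp hr with hr' | hr'
    · exact (List.pairwise_append.mp hp).2.2 r hr' g (by simp)
    · simp at hr'; subst hr'; exact le_refl _

theorem sweepB (x0 y0 total : Int) :
    ∀ (suf pre : List (List Int)) (d0 : Bool) (cnt : Int),
    (pre ++ suf).Pairwise (fun r s => pvF0 s ≤ pvF0 r) →
    suf.foldl (pvStep x0 y0 total) (d0, cnt, pvBestOf pre, pvMaxSnd pre, pre.getLast?.map pvF0)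
    = (d0 || suf.any (fun p => decide (x0 < pvF0 p) && decide (y0 < pvF1 p)),
       cnt + (suf.countP (fun p => decide (total < pvF0 p + pvF1 p) && !pvBeat (pre ++ suf) (pvF0 p) (pvF1 p)) : Int),
       pvBestOf (pre ++ suf), pvMaxSnd (pre ++ suf), (pre ++ suf).getLast?.map pvF0) := by
  intro suf
  induction suf with
  | nil => intro pre d0 cnt _; simp
  | cons p t ih =>
    intro pre d0 cnt hp
    have hassoc : pre ++ p :: t = (pre ++ [p]) ++ t := by simp
    have hsplit := List.pairwise_append.mp hp
    have hpre : pre.Pairwise (fun r s => pvF0 s ≤ pvF0 r) := hsplit.1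
    have hsuf : (p :: t).Pairwise (fun r s => pvF0 s ≤ pvF0 r) := hsplit.2.1
    have hcross : ∀ r ∈ pre, pvF0 p ≤ pvF0 r := fun r hr => hsplit.2.2 r hr p (by simp)
    have htle : ∀ s ∈ t, pvF0 s ≤ pvF0 p := fun s hs => (List.pairwise_cons.mp hsuf).1 s hs
    -- (1) the updated best
    have hbest :
        (match pre.getLast?.map pvF0 with
         | some pv => if pvF0 p < pv then pvMaxSnd pre else pvBestOf pre
         | none => pvBestOf pre)
        = pvMaxSnd (pre.filter (fun r => decide (pvF0 p < pvF0 r))) := by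
      cases hL : pre.getLast? with
      | none => simp [List.getLast?_eq_none_iff.mp hL, pvBestOf, pvMaxSnd]
      | some g =>
        have hgmem : g ∈ pre := List.mem_of_getLast? hL
        have hLF : pvLastF pre = pvF0 g := by simp [pvLastF, hL]
        have hple : pvF0 p ≤ pvF0 g := hcross g hgmem
        simp only [hL, Option.map_some]
        by_cases hlt : pvF0 p < pvF0 g
        · rw [if_pos hlt]
          have : pre.filter (fun r => decide (pvF0 p < pvF0 r)) = pre :=
            List.filter_eq_self.mpr (fun r hr => decide_eq_true
              (lt_of_lt_of_le hlt (hLF ▸ pvLastF_le pre hpre r hr)))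
          rw [this]
        · have heq : pvF0 p = pvF0 g := le_antisymm hple (not_lt.mp hlt)
          rw [if_neg hlt, pvBestOf, hLF, heq]
    -- (5) best invariant at pre ++ [p]
    have hbest' : pvBestOf (pre ++ [p]) = pvMaxSnd (pre.filter (fun r => decide (pvF0 p < pvF0 r))) := by
      have hLF : pvLastF (pre ++ [p]) = pvF0 p := by simp [pvLastF]
      rw [pvBestOf, hLF, List.filter_append]
      simp
    -- (2) the count condition is the domination predicate over the whole list
    have hcond :
        (match pvMaxSnd (pre.filter (fun r => decide (pvF0 p < pvF0 r))) with
         | none => true | some bb => decide (bb ≤ pvF1 p))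
        = ! pvBeat (pre ++ p :: t) (pvF0 p) (pvF1 p) := by
      rw [cond_eq]
      congr 1
      rw [List.any_filter, pvBeat]
      simp only [List.any_append, List.any_cons]
      have h1 : (decide (pvF0 p < pvF0 p) && decide (pvF1 p < pvF1 p)) = false := by simp
      have h2 : t.any (fun r => decide (pvF0 p < pvF0 r) && decide (pvF1 p < pvF1 r)) = false := by
        rw [List.any_eq_false]
        intro s hs
        simp [not_lt.mpr (htle s hs)]
      rw [h1, h2]
      simp
    -- step equals the invariant state at pre ++ [p]
    have hstep : pvStep x0 y0 total (d0, cnt, pvBestOf pre, pvMaxSnd pre, pre.getLast?.map pvF0) p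
        = (d0 || (decide (x0 < pvF0 p) && decide (y0 < pvF1 p)),
           cnt + (if decide (total < pvF0 p + pvF1 p) && !pvBeat (pre ++ p :: t) (pvF0 p) (pvF1 p) then (1:Int) else 0),
           pvBestOf (pre ++ [p]), pvMaxSnd (pre ++ [p]), (pre ++ [p]).getLast?.map pvF0) := by
      simp only [pvStep]
      rw [hbest, hcond]
      refine Prod.ext rfl (Prod.ext ?_ (Prod.ext ?_ (Prod.ext ?_ ?_))) <;> simp only []
      · split_ifs with h <;> simp [h]
      · rw [hbest']
      · simp only [pvMaxSnd, List.foldl_append, List.foldl_cons, List.foldl_nil]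
      · simp
    rw [List.foldl_cons, hstep, ih (pre ++ [p]) _ _ (hassoc ▸ hp)]
    rw [← hassoc]
    refine Prod.ext ?_ (Prod.ext ?_ rfl)
    · simp [Bool.or_assoc]
    · simp only [List.countP_cons]
      push_cast
      split_ifs with h <;> ring

theorem pvBeat_perm {l1 l2 : List (List Int)} (h : l1.Perm l2) (x y : Int) :
    pvBeat l1 x y = pvBeat l2 x y := by
  rw [pvBeat, pvBeat, Bool.eq_iff_iff, List.any_eq_true, List.any_eq_true]
  exact ⟨fun ⟨r, hr, hx⟩ => ⟨r, h.mem_iff.mp hr, hx⟩, fun ⟨r, hr, hx⟩ => ⟨r, h.mem_iff.mpr hr, hx⟩⟩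

theorem solution_alt_eq_canon (scores : List (List Int)) :
    solution_alt scores =
      (if pvBeat scores (pvF0 (PySem.List.pyGetD scores 0 [])) (pvF1 (PySem.List.pyGetD scores 0 [])) then (-1 : Int)
       else 1 + scores.countP (fun r =>
         decide (pvF0 (PySem.List.pyGetD scores 0 []) + pvF1 (PySem.List.pyGetD scores 0 []) < pvF0 r + pvF1 r)
         && !pvBeat scores (pvF0 r) (pvF1 r))) := by
  have hperm : (PySem.List.sorted scores (fun p => pvF0 p) true).Perm scores :=
    PySem.List.sorted_perm scores _ true
  have hpair : ((([] : List (List Int))) ++ PySem.List.sorted scores (fun p => pvF0 p) true).Pairwise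
      (fun r s => pvF0 s ≤ pvF0 r) := by
    simpa using PySem.List.sorted_pairwise_rev scores (fun p => pvF0 p)
  rw [solution_alt]
  have hrun := sweepB (pvF0 (PySem.List.pyGetD scores 0 [])) (pvF1 (PySem.List.pyGetD scores 0 []))
    (pvF0 (PySem.List.pyGetD scores 0 []) + pvF1 (PySem.List.pyGetD scores 0 []))
    (PySem.List.sorted scores (fun p => pvF0 p) true) [] false 1 hpair
  simp only [List.nil_append] at hrun
  rw [show ((false, (1:Int), (none : Option Int), (none : Option Int), (none : Option Int))
        : Bool × Int × Option Int × Option Int × Option Int)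
      = (false, 1, pvBestOf [], pvMaxSnd [], (([] : List (List Int)).getLast?.map pvF0)) from rfl, hrun]
  have hany : (PySem.List.sorted scores (fun p => pvF0 p) true).any
      (fun p => decide (pvF0 (PySem.List.pyGetD scores 0 []) < pvF0 p)
        && decide (pvF1 (PySem.List.pyGetD scores 0 []) < pvF1 p))
      = pvBeat scores (pvF0 (PySem.List.pyGetD scores 0 [])) (pvF1 (PySem.List.pyGetD scores 0 [])) :=
    pvBeat_perm hperm _ _
  have hcount : (PySem.List.sorted scores (fun p => pvF0 p) true).countP
      (fun r => decide (pvF0 (PySem.List.pyGetD scores 0 []) + pvF1 (PySem.List.pyGetD scores 0 []) < pvF0 r + pvF1 r)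
        && !pvBeat (PySem.List.sorted scores (fun p => pvF0 p) true) (pvF0 r) (pvF1 r))
      = scores.countP
      (fun r => decide (pvF0 (PySem.List.pyGetD scores 0 []) + pvF1 (PySem.List.pyGetD scores 0 []) < pvF0 r + pvF1 r)
        && !pvBeat scores (pvF0 r) (pvF1 r)) := by
    rw [show (fun r => decide (pvF0 (PySem.List.pyGetD scores 0 []) + pvF1 (PySem.List.pyGetD scores 0 []) < pvF0 r + pvF1 r)
        && !pvBeat (PySem.List.sorted scores (fun p => pvF0 p) true) (pvF0 r) (pvF1 r))
      = (fun r => decide (pvF0 (PySem.List.pyGetD scores 0 []) + pvF1 (PySem.List.pyGetD scores 0 []) < pvF0 r + pvF1 r)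
        && !pvBeat scores (pvF0 r) (pvF1 r)) from funext (fun r => by rw [pvBeat_perm hperm])]
    exact hperm.countP_eq _
  simp only [hany, hcount, Bool.false_or]

-- ==== A side ====
theorem getD_set_ne' (d : List Int) (i k : Nat) (v : Int) (hi : i < d.length) :
    (d.set i v).getD k (-1) = if k = i then v else d.getD k (-1) := by
  by_cases hk : k < d.length
  · rcases eq_or_ne k i with rfl | hne
    · simp [List.getD_eq_getElem?_getD, List.getElem?_set_self, hi]
    · simp [List.getD_eq_getElem?_getD, List.getElem?_set_ne (by omega : i ≠ k), hne]
  · have hki : k ≠ i := by omega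
    simp [List.getD_eq_getElem?_getD, List.getElem?_set_ne (by omega : i ≠ k),
      List.getElem?_eq_none (by omega : d.length ≤ k), hki]

theorem stage1 (l : List (List Int)) : ∀ (d : List Int),
    (∀ r ∈ l, 0 ≤ pvF0 r ∧ (pvF0 r).toNat < d.length) →
    (l.foldl (fun d r => PySem.List.pySetD d (pvF0 r) (max (PySem.List.pyGetD d (pvF0 r) (-1)) (pvF1 r))) d).length = d.length ∧
    ∀ k : Nat, k < d.length →
      (l.foldl (fun d r => PySem.List.pySetD d (pvF0 r) (max (PySem.List.pyGetD d (pvF0 r) (-1)) (pvF1 r))) d).getD k (-1)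
      = l.foldl (fun acc r => if (pvF0 r).toNat = k then max acc (pvF1 r) else acc) (d.getD k (-1)) := by
  induction l with
  | nil => intro d _; exact ⟨rfl, fun k _ => rfl⟩
  | cons r t ih =>
    intro d hd
    have h0 : 0 ≤ pvF0 r := (hd r (by simp)).1
    have hlt : (pvF0 r).toNat < d.length := (hd r (by simp)).2
    have hltI : pvF0 r < (d.length : Int) := by omega
    have hset : PySem.List.pySetD d (pvF0 r) (max (PySem.List.pyGetD d (pvF0 r) (-1)) (pvF1 r))
        = d.set (pvF0 r).toNat (max (d.getD (pvF0 r).toNat (-1)) (pvF1 r)) := by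
      rw [PySem.List.pySetD_of_nonneg _ _ h0, PySem.List.pyGetD_eq_getElem _ _ h0 hltI,
        List.getD_eq_getElem _ _ hlt]
    simp only [List.foldl_cons, hset]
    have hd' : ∀ s ∈ t, 0 ≤ pvF0 s ∧ (pvF0 s).toNat < (d.set (pvF0 r).toNat (max (d.getD (pvF0 r).toNat (-1)) (pvF1 r))).length := by
      intro s hs; simpa using hd s (by simp [hs])
    obtain ⟨hlen, hval⟩ := ih _ hd'
    refine ⟨by simpa using hlen, ?_⟩
    intro k hk
    rw [hval k (by simpa using hk)]
    rw [getD_set_ne' d (pvF0 r).toNat k _ hlt]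
    rcases eq_or_ne k (pvF0 r).toNat with rfl | hne
    · simp
    · simp [hne, Ne.symm hne]

def pvSmax (base : List Int) (k : Nat) : Int := (base.drop k).foldl max (-1)

theorem foldl_max_init (l : List Int) : ∀ a b : Int, l.foldl max (max a b) = max a (l.foldl max b) := by
  induction l with
  | nil => intro a b; rfl
  | cons x t ih =>
    intro a b
    simp only [List.foldl_cons]
    rw [max_assoc, ih]

theorem pvSmax_step (base : List Int) (k : Nat) (h : k < base.length) :
    pvSmax base k = max (base.getD k (-1)) (pvSmax base (k + 1)) := by
  rw [pvSmax, List.drop_eq_getElem_cons h, List.foldl_cons, max_comm (-1) _,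
    show max base[k] (-1) = max base[k] (-1) from rfl, foldl_max_init, pvSmax,
    List.getD_eq_getElem _ _ h]

theorem pvSmax_of_le (base : List Int) (k : Nat) (h : base.length ≤ k) : pvSmax base k = -1 := by
  rw [pvSmax, List.drop_eq_nil_of_le h]; rfl

theorem stage2 (base : List Int) : ∀ (n : Nat) (d : List Int),
    d.length = base.length → n + 1 < base.length →
    (∀ k : Nat, k < base.length → d.getD k (-1) = if k < n then base.getD k (-1) else pvSmax base k) →
    ((PySem.List.pyRange ((n : Int) - 1) (-1) (-1)).foldl
        (fun d i => PySem.List.pySetD d i (max (PySem.List.pyGetD d i (-1)) (PySem.List.pyGetD d (i + 1) (-1)))) d).length = base.length ∧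
    ∀ k : Nat, k < base.length →
      ((PySem.List.pyRange ((n : Int) - 1) (-1) (-1)).foldl
        (fun d i => PySem.List.pySetD d i (max (PySem.List.pyGetD d i (-1)) (PySem.List.pyGetD d (i + 1) (-1)))) d).getD k (-1)
      = pvSmax base k := by
  intro n
  induction n with
  | zero =>
    intro d hlen _ hinv
    rw [show ((0 : Nat) : Int) - 1 = -1 by norm_num, PySem.List.pyRange_neg_one_eq_nil (le_refl _)]
    exact ⟨hlen, fun k hk => by simpa using hinv k hk⟩
  | succ n ih =>
    intro d hlen hn hinv
    have hrange : PySem.List.pyRange (((n + 1 : Nat) : Int) - 1) (-1) (-1)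
        = (n : Int) :: PySem.List.pyRange ((n : Int) - 1) (-1) (-1) := by
      rw [show (((n + 1 : Nat) : Int) - 1) = (n : Int) by push_cast; ring]
      exact PySem.List.pyRange_neg_one_cons (by omega)
    rw [hrange, List.foldl_cons]
    have hnd : n < d.length := by omega
    have hn1d : n + 1 < d.length := by omega
    have hget1 : PySem.List.pyGetD d (n : Int) (-1) = d.getD n (-1) := by
      simp [PySem.List.pyGetD_natCast]
    have hget2 : PySem.List.pyGetD d ((n : Int) + 1) (-1) = d.getD (n + 1) (-1) := by
      rw [PySem.List.pyGetD_eq_getElem _ _ (by omega) (by push_cast; omega),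
        List.getD_eq_getElem _ _ hn1d]
      simp [show ((n : Int) + 1).toNat = n + 1 from by omega]
    have hv : max (PySem.List.pyGetD d (n : Int) (-1)) (PySem.List.pyGetD d ((n : Int) + 1) (-1))
        = pvSmax base n := by
      rw [hget1, hget2, hinv n (by omega), hinv (n + 1) (by omega), if_pos (by omega),
        if_neg (by omega), pvSmax_step base n (by omega)]
    have hset : PySem.List.pySetD d (n : Int)
          (max (PySem.List.pyGetD d (n : Int) (-1)) (PySem.List.pyGetD d ((n : Int) + 1) (-1)))
        = d.set n (pvSmax base n) := by
      rw [hv, PySem.List.pySetD_of_nonneg _ _ (by omega : (0:Int) ≤ (n:Int))]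
      simp
    rw [hset]
    refine ih _ (by simpa using hlen) (by omega) ?_
    intro k hk
    rw [getD_set_ne' d n k _ hnd]
    rcases eq_or_ne k n with rfl | hne
    · rw [if_pos rfl, if_neg (by omega)]
    · rw [if_neg hne, hinv k hk]
      rcases lt_trichotomy k n with hlt | heq | hgt
      · rw [if_pos (by omega), if_pos (by omega)]
      · omega
      · rw [if_neg (by omega), if_neg (by omega)]

theorem foldl_max_le_iff' (l : List Int) : ∀ a y : Int, l.foldl max a ≤ y ↔ a ≤ y ∧ ∀ v ∈ l, v ≤ y := by
  induction l with
  | nil => simp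
  | cons x t ih =>
    intro a y
    simp only [List.foldl_cons, ih, max_le_iff, List.mem_cons]
    constructor
    · rintro ⟨⟨h1, h2⟩, h3⟩; exact ⟨h1, fun v hv => hv.elim (fun e => e ▸ h2) (h3 v)⟩
    · rintro ⟨h1, h2⟩; exact ⟨⟨h1, h2 x (Or.inl rfl)⟩, fun v hv => h2 v (Or.inr hv)⟩

theorem bucket_le_iff (k : Nat) (y : Int) (l : List (List Int)) : ∀ a : Int,
    l.foldl (fun acc r => if (pvF0 r).toNat = k then max acc (pvF1 r) else acc) a ≤ y
    ↔ a ≤ y ∧ ∀ r ∈ l, (pvF0 r).toNat = k → pvF1 r ≤ y := by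
  induction l with
  | nil => simp
  | cons r t ih =>
    intro a
    simp only [List.foldl_cons, ih, List.mem_cons]
    by_cases hk : (pvF0 r).toNat = k
    · rw [if_pos hk]
      constructor
      · rintro ⟨h1, h2⟩
        exact ⟨(max_le_iff.mp h1).1, fun s hs hsk => hs.elim
          (fun e => e ▸ (max_le_iff.mp h1).2) (fun hs' => h2 s hs' hsk)⟩
      · rintro ⟨h1, h2⟩
        exact ⟨max_le_iff.mpr ⟨h1, h2 r (Or.inl rfl) hk⟩, fun s hs hsk => h2 s (Or.inr hs) hsk⟩
    · rw [if_neg hk]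
      constructor
      · rintro ⟨h1, h2⟩
        exact ⟨h1, fun s hs hsk => hs.elim (fun e => absurd (e ▸ hsk) hk) (fun hs' => h2 s hs' hsk)⟩
      · rintro ⟨h1, h2⟩
        exact ⟨h1, fun s hs hsk => h2 s (Or.inr hs) hsk⟩

theorem bucket_init_le (k : Nat) (l : List (List Int)) : ∀ a : Int,
    a ≤ l.foldl (fun acc r => if (pvF0 r).toNat = k then max acc (pvF1 r) else acc) a := by
  induction l with
  | nil => simp
  | cons r t ih =>
    intro a
    simp only [List.foldl_cons]
    refine le_trans ?_ (ih _)
    split_ifs <;> simp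

theorem bucket_const (k : Nat) (l : List (List Int)) (hk : ∀ r ∈ l, (pvF0 r).toNat ≠ k) (a : Int) :
    l.foldl (fun acc r => if (pvF0 r).toNat = k then max acc (pvF1 r) else acc) a = a := by
  induction l with
  | nil => rfl
  | cons r t ih =>
    simp only [List.foldl_cons, if_neg (hk r (by simp))]
    exact ih (fun s hs => hk s (by simp [hs]))

theorem bucket_ge_mem (k : Nat) (y : Int) (l : List (List Int)) (r : List Int) (hr : r ∈ l)
    (hk : (pvF0 r).toNat = k) (a : Int) :
    pvF1 r ≤ l.foldl (fun acc r => if (pvF0 r).toNat = k then max acc (pvF1 r) else acc) a := by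
  by_contra hlt
  exact absurd ((bucket_le_iff k _ l a).mp (le_refl _)).2 (fun hall => hlt (hall r hr hk))

theorem maxD_eq_max?_getD (l : List (List Int)) (k : List Int → Int) (d : List Int) :
    PySem.List.maxD l k d = (PySem.List.max? l k).getD d := by
  cases l <;> simp [PySem.List.maxD, PySem.List.max?]

theorem solution_eq_canon (scores : List (List Int)) (h : Pre_solution scores) :
    solution scores =
      (if pvBeat scores (pvF0 (PySem.List.pyGetD scores 0 [])) (pvF1 (PySem.List.pyGetD scores 0 [])) then (-1 : Int)
       else 1 + scores.countP (fun r =>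
         decide (pvF0 (PySem.List.pyGetD scores 0 []) + pvF1 (PySem.List.pyGetD scores 0 []) < pvF0 r + pvF1 r)
         && !pvBeat scores (pvF0 r) (pvF1 r))) := by
  obtain ⟨hne, hlen2p, hflcond, hrow0⟩ := h
  have htemp : PySem.List.pyGetD scores 0 [] ∈ scores := by
    refine PySem.List.pyGetD_mem _ _ ?_
    have : 0 < scores.length := List.length_pos_iff.mpr hne
    simp [PySem.Raise.InRange]
    omega
  set temp := PySem.List.pyGetD scores 0 [] with htempdef
  set x0 := pvF0 temp with hx0
  set y0 := pvF1 temp with hy0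
  set fl := scores.filter (fun x => decide (x0 + y0 < pvF0 x + pvF1 x)) with hfl
  have hfls : ∀ r ∈ fl, r ∈ scores := fun r hr => (List.mem_filter.mp hr).1
  have hdomfil : ∀ x y : Int, x0 + y0 ≤ x + y → pvBeat fl x y = pvBeat scores x y := by
    intro x y hxy
    rw [pvBeat, pvBeat, Bool.eq_iff_iff, List.any_eq_true, List.any_eq_true]
    constructor
    · rintro ⟨r, hr, hc⟩; exact ⟨r, hfls r hr, hc⟩
    · rintro ⟨r, hr, hc⟩
      rw [Bool.and_eq_true, decide_eq_true_eq, decide_eq_true_eq] at hc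
      refine ⟨r, List.mem_filter.mpr ⟨hr, by simp; omega⟩, by simp [hc.1, hc.2]⟩
  by_cases hflnil : fl = []
  · rw [solution]
    simp only [← htempdef, ← hx0, ← hy0, ← hfl, hflnil]
    rw [if_pos trivial]
    have hdom : pvBeat scores x0 y0 = false := by
      rw [← hdomfil x0 y0 (le_refl _), hflnil]; rfl
    rw [hdom]
    have hcnt : scores.countP (fun r => decide (x0 + y0 < pvF0 r + pvF1 r) && !pvBeat scores (pvF0 r) (pvF1 r)) = 0 := by
      rw [List.countP_eq_zero]
      intro r hr
      have : ¬ (x0 + y0 < pvF0 r + pvF1 r) := by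
        intro hlt
        have : r ∈ fl := List.mem_filter.mpr ⟨hr, by simpa using hlt⟩
        rw [hflnil] at this; simp at this
      simp [this]
    rw [hcnt]
    norm_num
  · -- fl nonempty
    have hex : ∃ r ∈ scores, x0 + y0 < pvF0 r + pvF1 r := by
      obtain ⟨r, hr⟩ := List.exists_mem_of_ne_nil fl hflnil
      obtain ⟨hrs, hrd⟩ := List.mem_filter.mp hr
      exact ⟨r, hrs, by simpa using hrd⟩
    have hx0n : 0 ≤ x0 := (hrow0 hex).1
    have hy0n : 0 ≤ y0 := (hrow0 hex).2
    have hnnfl : ∀ r ∈ fl, 0 ≤ pvF0 r ∧ 0 ≤ pvF1 r := by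
      intro r hr
      obtain ⟨hrs, hrd⟩ := List.mem_filter.mp hr
      exact ((hflcond r hrs (by simpa using hrd)).2)
    obtain ⟨g, hg⟩ : ∃ g, PySem.List.max? fl (fun x => pvF0 x) = some g := by
      cases hm : PySem.List.max? fl (fun x => pvF0 x) with
      | none => exact absurd (by simpa using congrArg Option.isNone hm) (by simpa using hflnil)
      | some g => exact ⟨g, rfl⟩
    have hgmem : g ∈ fl := PySem.List.max?_mem hg
    have hgmax : ∀ r ∈ fl, pvF0 r ≤ pvF0 g := PySem.List.max?_isMax hg
    set M := max (pvF0 g) x0 with hM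
    have hM0 : 0 ≤ M := le_trans hx0n (le_max_right _ _)
    have hMr : ∀ r ∈ fl, pvF0 r ≤ M := fun r hr => le_trans (hgmax r hr) (le_max_left _ _)
    have hlen0 : (List.replicate (M + 2).toNat (-1 : Int)).length = M.toNat + 2 := by
      simp [List.length_replicate]; omega
    -- stage 1
    have hpre1 : ∀ r ∈ fl, 0 ≤ pvF0 r ∧ (pvF0 r).toNat < (List.replicate (M + 2).toNat (-1 : Int)).length := by
      intro r hr
      have h0 := (hnnfl r hr).1
      have := hMr r hr
      exact ⟨h0, by rw [hlen0]; omega⟩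
    obtain ⟨hlen1, hval1⟩ := stage1 fl (List.replicate (M + 2).toNat (-1 : Int)) hpre1
    set data1 := fl.foldl (fun d r => PySem.List.pySetD d (pvF0 r) (max (PySem.List.pyGetD d (pvF0 r) (-1)) (pvF1 r)))
      (List.replicate (M + 2).toNat (-1 : Int)) with hdata1
    have hlen1' : data1.length = M.toNat + 2 := by rw [hdata1, hlen1, hlen0]
    have hbuck : ∀ k : Nat, k < M.toNat + 2 →
        data1.getD k (-1) = fl.foldl (fun acc r => if (pvF0 r).toNat = k then max acc (pvF1 r) else acc) (-1) := by
      intro k hk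
      rw [hdata1, hval1 k (by rw [hlen0]; omega), List.getD_replicate _ (by omega)]
    have hge1 : ∀ k : Nat, k < M.toNat + 2 → -1 ≤ data1.getD k (-1) := by
      intro k hk; rw [hbuck k hk]; exact bucket_init_le k fl (-1)
    -- stage 2 initial invariant
    have hinv0 : ∀ k : Nat, k < data1.length → data1.getD k (-1)
        = if k < M.toNat then data1.getD k (-1) else pvSmax data1 k := by
      intro k hk
      rw [hlen1'] at hk
      by_cases hkM : k < M.toNat
      · rw [if_pos hkM]
      · rw [if_neg hkM]
        have htop : data1.getD (M.toNat + 1) (-1) = -1 := by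
          rw [hbuck _ (by omega)]
          refine bucket_const _ _ (fun r hr => ?_) _
          have := hMr r hr
          have := (hnnfl r hr).1
          omega
        have hsma : pvSmax data1 (M.toNat + 1) = -1 := by
          rw [pvSmax_step data1 (M.toNat + 1) (by omega), htop,
            pvSmax_of_le data1 (M.toNat + 2) (by omega)]
          rfl
        rcases (by omega : k = M.toNat ∨ k = M.toNat + 1) with rfl | rfl
        · rw [pvSmax_step data1 _ (by omega), hsma]
          exact (max_eq_left (hge1 _ (by omega))).symm
        · rw [hsma, htop]
    obtain ⟨hlen2, hval2⟩ := stage2 data1 M.toNat data1 rfl (by rw [hlen1']; omega) hinv0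
    have hMeq : ((M.toNat : Int)) = M := Int.toNat_of_nonneg hM0
    rw [hMeq] at hlen2 hval2
    set data2 := (PySem.List.pyRange (M - 1) (-1) (-1)).foldl
      (fun d i => PySem.List.pySetD d i (max (PySem.List.pyGetD d i (-1)) (PySem.List.pyGetD d (i + 1) (-1)))) data1 with hdata2
    have hlen2' : data2.length = M.toNat + 2 := by rw [hdata2, hlen2, hlen1']
    -- the read characterization
    have hread : ∀ x y : Int, 0 ≤ x → x ≤ M → 0 ≤ y →
        (y < PySem.List.pyGetD data2 (x + 1) (-1) ↔ pvBeat fl x y = true) := by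
      intro x y hx hxM hy
      have hk2 : (x + 1).toNat < M.toNat + 2 := by omega
      have hgd : PySem.List.pyGetD data2 (x + 1) (-1) = data2.getD (x + 1).toNat (-1) := by
        rw [PySem.List.pyGetD_eq_getElem _ _ (by omega) (by rw [hlen2']; push_cast; omega),
          List.getD_eq_getElem _ _ (by rw [hlen2']; omega)]
      rw [hgd, hval2 _ (by rw [hlen1']; omega)]
      set k := (x + 1).toNat with hkdef
      rw [pvBeat, List.any_eq_true]
      constructor
      · intro hlt
        by_contra hnone
        push_neg at hnone
        have hall : ∀ v ∈ data1.drop k, v ≤ y := by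
          intro v hv
          obtain ⟨i, hi, hiv⟩ := List.mem_iff_getElem.mp hv
          rw [List.getElem_drop] at hiv
          have hki : k + i < M.toNat + 2 := by
            have := hi; rw [List.length_drop, hlen1'] at this; omega
          rw [← List.getD_eq_getElem _ (-1) (by rw [hlen1']; omega)] at hiv
          rw [← hiv, hbuck _ hki, bucket_le_iff]
          refine ⟨by omega, fun r hr hrk => ?_⟩
          have h0r := (hnnfl r hr).1
          by_contra hylt
          exact hnone r hr (by
            simp only [Bool.and_eq_true, decide_eq_true_eq]
            exact ⟨by omega, by omega⟩)
        have hle : pvSmax data1 k ≤ y := by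
          rw [pvSmax]; exact (foldl_max_le_iff' (data1.drop k) (-1) y).mpr ⟨by omega, hall⟩
        omega
      · rintro ⟨r, hr, hcond⟩
        rw [Bool.and_eq_true, decide_eq_true_eq, decide_eq_true_eq] at hcond
        have h0r := (hnnfl r hr).1
        have hMrr := hMr r hr
        have hjk : k ≤ (pvF0 r).toNat := by omega
        have hjlt : (pvF0 r).toNat < M.toNat + 2 := by omega
        have hmemd : data1.getD (pvF0 r).toNat (-1) ∈ data1.drop k := by
          rw [List.getD_eq_getElem _ _ (by rw [hlen1']; omega)]
          refine List.mem_iff_getElem.mpr ⟨(pvF0 r).toNat - k, ?_, ?_⟩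
          · rw [List.length_drop, hlen1']; omega
          · rw [List.getElem_drop]; congr 1; omega
        have hvle := (foldl_max_le_iff' (data1.drop k) (-1) ((data1.drop k).foldl max (-1))).mp (le_refl ((data1.drop k).foldl max (-1)))
        have h1 : data1.getD (pvF0 r).toNat (-1) ≤ pvSmax data1 k := by
          rw [pvSmax]; exact hvle.2 _ hmemd
        have h2 : pvF1 r ≤ data1.getD (pvF0 r).toNat (-1) := by
          rw [hbuck _ hjlt]
          exact bucket_ge_mem _ 0 fl r hr rfl (-1)
        omega
    -- assemble
    rw [solution]
    simp only [← htempdef, ← hx0, ← hy0, ← hfl, maxD_eq_max?_getD, hg, Option.getD_some, ← hM,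
      ← hdata1, ← hdata2]
    rw [if_neg hflnil]
    have hdom0 : (PySem.List.pyGetD data2 (x0 + 1) (-1) > y0) ↔ pvBeat scores x0 y0 = true := by
      rw [gt_iff_lt, hread x0 y0 hx0n (le_max_right _ _) hy0n, hdomfil x0 y0 (le_refl _)]
    by_cases hd : pvBeat scores x0 y0 = true
    · rw [if_pos (hdom0.mpr hd), if_pos hd]
    · rw [if_neg (fun hh => hd (hdom0.mp hh)), if_neg hd]
      have hcg : ∀ (ans : Int) (r : List Int), r ∈ fl →
          (if PySem.List.pyGetD data2 (pvF0 r + 1) (-1) > pvF1 r then ans else ans + 1)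
          = (if (!pvBeat scores (pvF0 r) (pvF1 r)) = true then ans + 1 else ans) := by
        intro ans r hr
        have h0 := hnnfl r hr
        have hsum : x0 + y0 ≤ pvF0 r + pvF1 r := by
          have := (List.mem_filter.mp hr).2
          rw [decide_eq_true_eq] at this
          omega
        have hcnd := hread (pvF0 r) (pvF1 r) h0.1 (hMr r hr) h0.2
        rw [hdomfil (pvF0 r) (pvF1 r) hsum] at hcnd
        by_cases hdr : pvBeat scores (pvF0 r) (pvF1 r) = true
        · rw [if_pos (by rw [gt_iff_lt]; exact hcnd.mpr hdr), if_neg (by simp [hdr])]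
        · rw [if_neg (by rw [gt_iff_lt]; exact fun hh => hdr (hcnd.mp hh)),
            if_pos (by simp [Bool.not_eq_true] at hdr; simp [hdr])]
      rw [show (List.foldl (fun ans r => if PySem.List.pyGetD data2 (pvF0 r + 1) (-1) > pvF1 r then ans else ans + 1) (1 : Int) fl)
          = List.foldl (fun ans r => if (!pvBeat scores (pvF0 r) (pvF1 r)) = true then ans + 1 else ans) (1 : Int) fl from
          PySem.List.foldl_congr_mem fl _ _ (1 : Int) hcg,
        PySem.List.foldl_count_if (fun r => !pvBeat scores (pvF0 r) (pvF1 r)) fl 1]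
      congr 1
      rw [hfl, List.countP_filter]
      exact congrArg Nat.cast (congrFun (congrArg List.countP (funext (fun r => Bool.and_comm _ _))) scores)

-- ===== VERDICT (by name: the statement is the Claim_ definition above) =====
theorem solution_spec : Claim_equal_solution := by
  intro scores _ hpre
  unfold Spec_solution
  rw [solution_eq_canon scores hpre, solution_alt_eq_canon scores]
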